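-- pv_equiv track=rewrite | github.com/congsoony/Algorithm | 프로그래머스/pccp/pccp_1-1.py | solution
-- ===== SOURCE A (Python) =====
-- from collections import Counter
--
-- def solution(input_string):
--     s = input_string
--     answer = ''
--     i = 0
--     c = Counter()
--     while i<len(s):
--         j = i+1
--         c[s[i]]+=1
--         while j<len(s) and s[i]==s[j]:
--             j+=1
--         i=j
--     for i in range(26):
--         if c[chr(ord('a')+i)] >=2:
--             answer+=chr(ord('a')+i)
--     if answer =='':
--         return 'N'
--
--     return answer
-- ===== SOURCE B (Python) =====
-- from collections import Counter
--
-- def solution(input_string):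
--     # runs(ch) = occurrences(ch) - adjacent-equal pairs of ch: each run of length k
--     # contributes k occurrences and k-1 adjacent equal pairs.
--     s = input_string
--     total = Counter(s)
--     dup = Counter(a for a, b in zip(s, s[1:]) if a == b)
--     answer = ''.join(ch for ch in 'abcdefghijklmnopqrstuvwxyz' if total[ch] - dup[ch] >= 2)
--     return answer or 'N'
-- ===== Notes on version B (the rewrite author's own statement) =====
-- stated objective: alternative
-- what changed: Replaces A's nested-while run scanner (outer index loop + inner run-skipping loop counting each run's head) with an arithmetic identity: number of runs of a character = its total occurrences minus its adjacent-equal pairs, computed from two Counters (one over the string, one over zip(s, s[1:]) filtered to equal pairs), then the same a-z filter with 'N' fallback.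
import Mathlib
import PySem

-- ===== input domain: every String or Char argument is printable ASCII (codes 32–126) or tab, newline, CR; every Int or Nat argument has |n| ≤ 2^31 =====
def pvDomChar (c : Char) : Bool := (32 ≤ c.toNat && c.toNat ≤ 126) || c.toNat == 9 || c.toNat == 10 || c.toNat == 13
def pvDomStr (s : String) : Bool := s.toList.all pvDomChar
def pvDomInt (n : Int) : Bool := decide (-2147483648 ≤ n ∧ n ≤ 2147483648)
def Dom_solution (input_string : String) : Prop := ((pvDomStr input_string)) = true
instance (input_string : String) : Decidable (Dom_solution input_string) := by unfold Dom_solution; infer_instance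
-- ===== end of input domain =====

-- B avoids run scanning entirely: runs(ch) = occurrences(ch) minus adjacent-equal pairs
-- of ch (two Counters and an arithmetic identity); alternative decomposition, return value only.

-- ===== PORT A =====
-- inner while: 'while j<len(s) and s[i]==s[j]: j+=1'  (fuel only makes the loop total;
-- fuel = len(s) - i ≥ the number of iterations, so the computation is exactly the loop's)
def pvSkip (l : List Char) (ch : Char) : Nat → Nat → Nat
  | 0, j => j
  | fuel + 1, j =>
    if h : j < l.length then
      if ch == l[j] then pvSkip l ch fuel (j + 1) else j
    else j

-- outer while: 'while i<len(s): j=i+1; c[s[i]]+=1; while …; i=j'  (fuel = len(s) suffices)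
def pvScanA (l : List Char) : Nat → Nat → PySem.Dict Char Int → PySem.Dict Char Int
  | 0, _, c => c
  | fuel + 1, i, c =>
    if h : i < l.length then
      pvScanA l fuel (pvSkip l l[i] (l.length - i) (i + 1)) (c.modify l[i] 0 (· + 1))
    else c

def solution (input_string : String) : String :=
  let s := input_string.toList
  let c := pvScanA s s.length 0 PySem.Dict.empty
  let answer := (PySem.List.pyRange 0 26 1).foldl (fun acc i =>
    if c.getD (Char.ofNat (97 + i).toNat) 0 ≥ 2 then acc ++ [Char.ofNat (97 + i).toNat] else acc) []
  if answer = [] then "N" else String.ofList answer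

-- ===== PORT B =====
-- 'Counter(a for a, b in zip(s, s[1:]) if a == b)' : the first components of the
-- equal adjacent pairs ('s[1:]' on a nonnegative index is List.drop 1, exact)
def pvEqPairs (l : List Char) : List Char :=
  ((l.zip (l.drop 1)).filter (fun ab => ab.1 == ab.2)).map (·.1)

def solution_alt (input_string : String) : String :=
  let s := input_string.toList
  let total := PySem.Dict.counter s
  let dup := PySem.Dict.counter (pvEqPairs s)
  let answer := "abcdefghijklmnopqrstuvwxyz".toList.filter
    (fun ch => total.getD ch 0 - dup.getD ch 0 ≥ 2)
  if answer = [] then "N" else String.ofList answer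

-- ===== PRECONDITION & SPEC =====
def Spec_solution (input_string : String) (out : String) : Prop := out = solution_alt input_string
instance (input_string : String) (out : String) : Decidable (Spec_solution input_string out) := by unfold Spec_solution; infer_instance

-- ===== CLAIM (what is proved, stated in full; the proofs are below) =====
def Claim_equal_solution : Prop := ∀ (input_string : String), Dom_solution input_string → Spec_solution input_string (solution input_string)

-- ===== LEMMAS AND PROOFS =====

-- run heads A visits (same fuel discipline as pvScanA)
def pvHeads (l : List Char) : Nat → Nat → List Char
  | 0, _ => []
  | fuel + 1, i =>
    if h : i < l.length then l[i] :: pvHeads l fuel (pvSkip l l[i] (l.length - i) (i + 1))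
    else []

-- the run heads, as a recursion on (prev, rest)
def pvCollapse (p : Option Char) : List Char → List Char
  | [] => []
  | a :: t => if p ≠ some a then a :: pvCollapse (some a) t else pvCollapse p t

theorem pvSkip_ge (l : List Char) (ch : Char) (fuel j : Nat) : j ≤ pvSkip l ch fuel j := by
  induction fuel generalizing j with
  | zero => simp [pvSkip]
  | succ fuel ih =>
      simp only [pvSkip]
      split_ifs with h1 h2
      · exact le_trans (by omega) (ih (j + 1))
      · exact le_refl j
      · exact le_refl j

theorem pvSkip_post (l : List Char) (ch : Char) (fuel j : Nat) (hf : l.length ≤ j + fuel) :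
    ∀ h : pvSkip l ch fuel j < l.length, l[pvSkip l ch fuel j] ≠ ch := by
  induction fuel generalizing j with
  | zero =>
      intro h
      simp only [pvSkip] at h ⊢
      omega
  | succ fuel ih =>
      simp only [pvSkip]
      split_ifs with h1 h2
      · exact ih (j + 1) (by omega)
      · intro _ e
        exact h2 (by simp [e])
      · intro h'
        exact absurd h' h1

theorem pvScanA_eq_foldl (l : List Char) (fuel i : Nat) (c : PySem.Dict Char Int) :
    pvScanA l fuel i c = (pvHeads l fuel i).foldl (fun d x => d.modify x 0 (· + 1)) c := by
  induction fuel generalizing i c with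
  | zero => rfl
  | succ fuel ih =>
      simp only [pvScanA, pvHeads]
      split_ifs with h
      · simp only [List.foldl_cons]; exact ih _ _
      · rfl

theorem pvCollapse_skip (l : List Char) (ch : Char) (fuel j : Nat) :
    pvCollapse (some ch) (l.drop j) = pvCollapse (some ch) (l.drop (pvSkip l ch fuel j)) := by
  induction fuel generalizing j with
  | zero => rfl
  | succ fuel ih =>
      simp only [pvSkip]
      split_ifs with h1 h2
      · have hc : ch = l[j] := by simpa using h2
        rw [← ih (j + 1), List.drop_eq_getElem_cons h1]
        simp [pvCollapse, hc]
      · rfl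
      · rfl

theorem pvHeads_eq_collapse (l : List Char) (fuel i : Nat) (p : Option Char)
    (hf : l.length ≤ i + fuel) (hp : ∀ h : i < l.length, p ≠ some l[i]) :
    pvHeads l fuel i = pvCollapse p (l.drop i) := by
  induction fuel generalizing i p with
  | zero =>
      rw [pvHeads, List.drop_eq_nil_iff.mpr (by omega)]
      rfl
  | succ fuel ih =>
      simp only [pvHeads]
      split_ifs with h
      · rw [List.drop_eq_getElem_cons h]
        rw [show pvCollapse p (l[i] :: l.drop (i + 1))
              = l[i] :: pvCollapse (some l[i]) (l.drop (i + 1)) from by simp [pvCollapse, hp h]]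
        congr 1
        rw [pvCollapse_skip l l[i] (l.length - i) (i + 1)]
        apply ih
        · have := pvSkip_ge l l[i] (l.length - i) (i + 1)
          omega
        · intro h' e
          exact pvSkip_post l l[i] (l.length - i) (i + 1) (by omega) h' (Option.some.inj e).symm
      · rw [List.drop_eq_nil_iff.mpr (by omega)]
        rfl

-- the arithmetic identity behind B: each run contributes 1 head and (len-1) equal pairs
theorem pv_runs_aux (t : List Char) (a ch : Char) :
    (if a = ch then 1 else 0) + (pvCollapse (some a) t).count ch + (pvEqPairs (a :: t)).count ch
      = (a :: t).count ch := by
  induction t generalizing a with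
  | nil => simp [pvCollapse, pvEqPairs, List.count_cons]
  | cons b u ih =>
      by_cases hab : a = b
      · subst hab
        have h := ih a
        simp only [pvCollapse, pvEqPairs, List.drop_one, List.tail_cons, List.zip_cons_cons,
          List.filter_cons, List.count_cons, beq_iff_eq] at h ⊢
        simp only [ne_eq, not_true_eq_false, if_false, if_true] at *
        by_cases hch : a = ch <;> simp [hch] at h ⊢ <;> omega
      · have h := ih b
        simp only [pvCollapse, pvEqPairs, List.drop_one, List.tail_cons, List.zip_cons_cons,
          List.filter_cons, List.count_cons, beq_iff_eq] at h ⊢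
        simp only [ne_eq, Option.some.injEq, hab, not_false_eq_true, if_true, if_false] at *
        by_cases hach : a = ch <;> by_cases hbch : b = ch <;>
          simp [hach, hbch] at h ⊢ <;> omega

theorem pv_runs_add_pairs (l : List Char) (ch : Char) :
    (pvCollapse none l).count ch + (pvEqPairs l).count ch = l.count ch := by
  cases l with
  | nil => simp [pvCollapse, pvEqPairs]
  | cons a t =>
      have h := pv_runs_aux t a ch
      simp only [pvCollapse, ne_eq, reduceCtorEq, not_false_eq_true, if_true,
        List.count_cons, beq_iff_eq] at h ⊢
      by_cases hch : a = ch <;> simp [hch] at h ⊢ <;> omega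

theorem pv_point (l : List Char) (ch : Char) :
    ((pvCollapse none l).foldl (fun d x => d.modify x 0 (· + 1)) PySem.Dict.empty).getD ch 0
      = (PySem.Dict.counter l).getD ch 0 - (PySem.Dict.counter (pvEqPairs l)).getD ch 0 := by
  rw [PySem.Dict.getD_foldl_modify_add_one, PySem.Dict.getD_empty,
    PySem.Dict.getD_counter, PySem.Dict.getD_counter]
  have h := pv_runs_add_pairs l ch
  omega

theorem pv_answer (c : PySem.Dict Char Int) :
    ((PySem.List.pyRange 0 26 1).filter
        (fun i => decide (c.getD (Char.ofNat (97 + i).toNat) 0 ≥ 2))).map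
      (fun i => Char.ofNat (97 + i).toNat)
    = "abcdefghijklmnopqrstuvwxyz".toList.filter (fun ch => decide (c.getD ch 0 ≥ 2)) := by
  have hc : (fun i : Int => decide (c.getD (Char.ofNat (97 + i).toNat) 0 ≥ 2))
      = (fun ch => decide (c.getD ch 0 ≥ 2)) ∘ (fun i : Int => Char.ofNat (97 + i).toNat) := rfl
  rw [hc, ← List.filter_map]
  rw [show (PySem.List.pyRange 0 26 1).map (fun i : Int => Char.ofNat (97 + i).toNat)
        = "abcdefghijklmnopqrstuvwxyz".toList from by decide]

theorem pv_filter (l : List Char) :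
    "abcdefghijklmnopqrstuvwxyz".toList.filter
        (fun ch => decide (((pvCollapse none l).foldl (fun d x => d.modify x 0 (· + 1))
            (PySem.Dict.empty : PySem.Dict Char Int)).getD ch 0 ≥ 2))
    = "abcdefghijklmnopqrstuvwxyz".toList.filter
        (fun ch => decide ((PySem.Dict.counter l).getD ch 0
            - (PySem.Dict.counter (pvEqPairs l)).getD ch 0 ≥ 2)) := by
  refine List.filter_congr ?_
  intro ch _
  rw [decide_eq_decide, pv_point]

-- ===== VERDICT (by name: the statement is the Claim_ definition above) =====
theorem solution_spec : Claim_equal_solution := by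
  intro s _
  unfold Spec_solution solution solution_alt
  simp only [pvScanA_eq_foldl,
    pvHeads_eq_collapse s.toList s.toList.length 0 none (by omega) (by intro _; simp),
    List.drop_zero]
  rw [PySem.List.foldl_append_ite, List.nil_append, pv_answer, pv_filter]
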